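-- pv_equiv track=rewrite | github.com/pbrucla/exflag | exflag.py | parse_glob
-- ===== SOURCE A (Python) =====
-- from typing import Callable, List
--
-- def parse_glob(glob: str) -> List[int]:
--     """
--     "parse" the charset "glob"
--     """
--     lexed_glob = []
--     parse_pos = 0
--     eof_pos = len(glob)
--     while parse_pos < len(glob):
--         if glob[parse_pos] == "\\":
--             if parse_pos + 1 == eof_pos:
--                 raise SyntaxError('truncated escape in charset "glob"')
--             match glob[parse_pos + 1]:
--                 case "\\":
--                     lexed_glob.append("\\")
--                 case "-":
--                     lexed_glob.append("-")
--                 case _: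
--                     raise SyntaxError('invalid escape in charset "glob"')
--             parse_pos += 2
--         elif glob[parse_pos] == "-":
--             lexed_glob.append(None)
--             parse_pos += 1
--         else:
--             lexed_glob.append(glob[parse_pos])
--             parse_pos += 1
--     parsed_glob = []
--     parse_pos = 0
--     eof_pos = len(lexed_glob)
--     while parse_pos < len(lexed_glob):
--         if lexed_glob[parse_pos] is None:
--             raise SyntaxError('invalid range in charset "glob"')
--         if parse_pos + 1 != eof_pos and lexed_glob[parse_pos + 1] is None:
--             if parse_pos + 2 == eof_pos:
--                 raise SyntaxError('invalid range in charset "glob"')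
--             parsed_glob += list(range(ord(lexed_glob[parse_pos]), ord(lexed_glob[parse_pos + 2]) + 1))
--             parse_pos += 3
--         else:
--             parsed_glob.append(ord(lexed_glob[parse_pos]))
--             parse_pos += 1
--     return parsed_glob
-- ===== SOURCE B (Python) =====
-- def parse_glob(glob):
--     """Single streaming pass over the raw string (no intermediate token list)."""
--     n = len(glob)
--
--     def unit(i):
--         # resolve one unit at position i: (char, next) or (None, next) for a bare dash
--         c = glob[i]
--         if c == "\\":
--             if i + 1 == n:
--                 raise SyntaxError('truncated escape in charset "glob"')
--             if glob[i + 1] in ("\\", "-"):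
--                 return glob[i + 1], i + 2
--             raise SyntaxError('invalid escape in charset "glob"')
--         if c == "-":
--             return None, i + 1
--         return c, i + 1
--
--     out = []
--     i = 0
--     while i < n:
--         start, i = unit(i)
--         if start is None:
--             raise SyntaxError('invalid range in charset "glob"')
--         if i < n and glob[i] == "-":
--             i += 1
--             if i == n:
--                 raise SyntaxError('invalid range in charset "glob"')
--             end, i = unit(i)
--             out.extend(range(ord(start), ord(end) + 1))
--         else:
--             out.append(ord(start))
--     return out
-- ===== Notes on version B (the rewrite author's own statement) =====
-- stated objective: simpler
-- what changed: B replaces A's two materialized passes (lex to a token list, then parse the token list) with a single streaming pass over the raw string that resolves each unit in place and never builds the intermediate token list.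
import Mathlib
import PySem

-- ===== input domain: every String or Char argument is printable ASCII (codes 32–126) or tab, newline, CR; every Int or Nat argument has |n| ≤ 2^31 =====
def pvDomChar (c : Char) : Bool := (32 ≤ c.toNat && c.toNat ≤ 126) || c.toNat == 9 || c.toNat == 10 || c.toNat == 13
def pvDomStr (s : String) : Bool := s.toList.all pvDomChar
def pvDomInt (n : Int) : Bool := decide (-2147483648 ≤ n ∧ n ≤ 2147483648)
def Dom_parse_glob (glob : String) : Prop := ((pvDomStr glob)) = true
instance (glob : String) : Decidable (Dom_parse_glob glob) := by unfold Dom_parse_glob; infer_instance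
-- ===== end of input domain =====

-- B folds A's two materialized passes (lex to a token list, then parse it) into one
-- streaming pass over the raw characters; objective: simpler (no intermediate list).

-- ===== PORT A =====
-- ord(c) as Int
def pyOrd (c : Char) : Int := (c.toNat : Int)
-- list(range(ord a, ord b + 1))
def rangeOf (a b : Char) : List Int := PySem.List.pyRange (pyOrd a) (pyOrd b + 1) 1

-- first while loop of A: lex the raw string into tokens (some c = literal char, none = bare dash);
-- Option: none = SyntaxError (truncated or invalid escape)
def lexA : List Char → Option (List (Option Char))
  | [] => some []
  | c :: rest =>
    if c = '\\' then
      match rest with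
      | [] => none
      | d :: rest' =>
        if d = '\\' then (lexA rest').map (fun l => some '\\' :: l)
        else if d = '-' then (lexA rest').map (fun l => some '-' :: l)
        else none
    else if c = '-' then (lexA rest).map (fun l => none :: l)
    else (lexA rest).map (fun l => some c :: l)

-- second while loop of A over the token list; Option: none = SyntaxError / TypeError (ord None)
def pA : List (Option Char) → Option (List Int)
  | [] => some []
  | none :: _ => none
  | some c :: none :: rest =>
    (match rest with
     | [] => none
     | none :: _ => none          -- ord(None): TypeError in Python
     | some d :: rest' => (pA rest').map (fun l => rangeOf c d ++ l))
  | some c :: rest => (pA rest).map (fun l => pyOrd c :: l)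

def parse_glob (glob : String) : List Int :=
  ((lexA glob.toList).bind pA).getD []

-- ===== PORT B =====
-- one streaming pass; goB start rest = the loop body after the start unit has been resolved
-- (Source B's unit() is resolved in place by the patterns: '\'-escape / bare '-' / literal)
mutual
def pB : List Char → Option (List Int)
  | [] => some []
  | c :: rest =>
    if c = '\\' then
      match rest with
      | [] => none                                        -- truncated escape
      | d :: rest' => if d = '\\' ∨ d = '-' then goB d rest' else none
    else if c = '-' then none                             -- orphan / leading dash
    else goB c rest
  termination_by cs => 2 * cs.length
  decreasing_by all_goals (simp_wf; try omega)

-- the loop body after the start unit has been resolved (Source B after `start, i = unit(i)`)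
def goB (start : Char) (rest : List Char) : Option (List Int) :=
  match rest with
  | m :: rest2 =>
    if m = '-' then                                       -- unescaped dash: a range
      match rest2 with
      | [] => none                                        -- trailing dash
      | f :: rest3 =>
        if f = '\\' then
          match rest3 with
          | [] => none                                    -- truncated escape
          | g :: rest4 =>
            if g = '\\' ∨ g = '-' then (pB rest4).map (fun l => rangeOf start g ++ l)
            else none
        else if f = '-' then none                         -- range end is a bare dash
        else (pB rest3).map (fun l => rangeOf start f ++ l)
    else (pB (m :: rest2)).map (fun l => pyOrd start :: l)
  | [] => (pB []).map (fun l => pyOrd start :: l)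
  termination_by 2 * rest.length + 1
  decreasing_by all_goals (simp_wf; try omega)
end

def parse_glob_alt (glob : String) : List Int :=
  (pB glob.toList).getD []

-- ===== PRECONDITION & SPEC =====
-- Pre_ excludes exactly the inputs on which Python A raises (SyntaxError on a truncated or
-- invalid escape, an orphan/leading/trailing dash, or TypeError on ord(None) when a range
-- end is a bare dash); B raises on exactly the same inputs.
-- structural recognizer of the glob grammar: item ( '-' item )? repeated, where an item is
-- an escaped '\' or '-' or a literal non-dash character
def okEsc (d : Char) : Bool := d = '\\' || d = '-'

def preB : List Char → Bool
  | [] => true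
  | '-' :: _ => false
  | '\\' :: [] => false
  | '\\' :: _ :: '-' :: [] => false
  | '\\' :: _ :: '-' :: '-' :: _ => false
  | '\\' :: _ :: '-' :: '\\' :: [] => false
  | '\\' :: d :: '-' :: '\\' :: g :: r => okEsc d && (okEsc g && preB r)
  | '\\' :: d :: '-' :: _ :: r => okEsc d && preB r
  | '\\' :: d :: r => okEsc d && preB r
  | _ :: '-' :: [] => false
  | _ :: '-' :: '-' :: _ => false
  | _ :: '-' :: '\\' :: [] => false
  | _ :: '-' :: '\\' :: g :: r => okEsc g && preB r
  | _ :: '-' :: _ :: r => preB r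
  | _ :: r => preB r

def Pre_parse_glob (glob : String) : Prop := preB glob.toList = true
instance (glob : String) : Decidable (Pre_parse_glob glob) := by unfold Pre_parse_glob; infer_instance
def pvWitness_parse_glob : String := "a-c"

def Spec_parse_glob (glob : String) (out : List Int) : Prop := out = parse_glob_alt glob
instance (glob : String) (out : List Int) : Decidable (Spec_parse_glob glob out) := by unfold Spec_parse_glob; infer_instance

-- ===== CLAIM (what is proved, stated in full; the proofs are below) =====
def Claim_equal_parse_glob : Prop := ∀ (glob : String), Dom_parse_glob glob → Pre_parse_glob glob → Spec_parse_glob glob (parse_glob glob)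

-- ===== LEMMAS AND PROOFS =====

theorem bind_map_out {α β γ : Type} (o : Option α) (g : α → Option β) (f : β → γ) :
    o.bind (fun x => (g x).map f) = (o.bind g).map f := by cases o <;> rfl

theorem bind_none_out {α β : Type} (o : Option α) :
    o.bind (fun _ => (none : Option β)) = none := by cases o <;> rfl

theorem map_bind_out {α β γ : Type} (o : Option α) (f : α → β) (g : β → Option γ) :
    (o.map f).bind g = o.bind (fun x => g (f x)) := by cases o <;> rfl

-- reduction facts for A's second pass on exposed token-list heads
theorem pA_one (e : Char) : pA [some e] = some [pyOrd e] := rfl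
theorem pA_some_some (e f : Char) (l : List (Option Char)) :
    pA (some e :: some f :: l) = (pA (some f :: l)).map (fun l => pyOrd e :: l) := rfl
theorem pA_dash_nil (e : Char) : pA [some e, none] = none := rfl
theorem pA_dash_dash (e : Char) (l : List (Option Char)) :
    pA (some e :: none :: none :: l) = none := rfl
theorem pA_dash_some (e d : Char) (l : List (Option Char)) :
    pA (some e :: none :: some d :: l) = (pA l).map (fun l => rangeOf e d ++ l) := rfl
theorem pA_none (l : List (Option Char)) : pA (none :: l) = none := rfl

-- shape of A's lexer output on each kind of raw head
theorem lexA_dash (r : List Char) :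
    lexA ('-' :: r) = (lexA r).map (fun l => (none : Option Char) :: l) := by
  rw [lexA.eq_def]; simp
theorem lexA_esc {d : Char} (hd : d = '\\' ∨ d = '-') (r : List Char) :
    lexA ('\\' :: d :: r) = (lexA r).map (fun l => some d :: l) := by
  rcases hd with h | h <;> subst h <;> simp [lexA]
theorem lexA_esc_bad {d : Char} (h1 : d ≠ '\\') (h2 : d ≠ '-') (r : List Char) :
    lexA ('\\' :: d :: r) = none := by rw [lexA.eq_def]; simp [h1, h2]
theorem lexA_esc_nil : lexA ['\\'] = none := by simp [lexA]
theorem lexA_lit {c : Char} (h1 : c ≠ '\\') (h2 : c ≠ '-') (r : List Char) :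
    lexA (c :: r) = (lexA r).map (fun l => some c :: l) := by rw [lexA.eq_def]; simp [h1, h2]

theorem main_equiv : ∀ (n : Nat) (cs : List Char), cs.length ≤ n →
    ((lexA cs).bind pA = pB cs) ∧
    (∀ e : Char, (lexA cs).bind (fun l => pA (some e :: l)) = goB e cs) := by
  intro n
  induction n with
  | zero =>
    intro cs h
    have hnil : cs = [] := List.eq_nil_of_length_eq_zero (Nat.le_zero.1 h)
    subst hnil
    refine ⟨by rw [pB.eq_def]; rfl, fun e => ?_⟩
    rw [goB.eq_def]; simp [lexA, pB.eq_def, pA_one]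
  | succ n ih =>
    intro cs hlen
    match cs with
    | [] =>
      refine ⟨by rw [pB.eq_def]; rfl, fun e => ?_⟩
      rw [goB.eq_def]; simp [lexA, pB.eq_def, pA_one]
    | c :: rest =>
      simp only [List.length_cons, Nat.add_le_add_iff_right] at hlen
      -- Q part: ∀ e, (lexA (c :: rest)).bind (pA (some e :: ·)) = goB e (c :: rest)
      have hQ : ∀ e : Char,
          (lexA (c :: rest)).bind (fun l => pA (some e :: l)) = goB e (c :: rest) := by
        intro e
        by_cases hc : c = '\\'
        · subst hc
          match rest with
          | [] => rw [goB.eq_def, lexA_esc_nil]; simp [pB.eq_def]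
          | f :: rest3 =>
            have h3 : rest3.length ≤ n := by simp at hlen; omega
            by_cases hf : f = '\\' ∨ f = '-'
            · have hQ3 := (ih rest3 h3).2 f
              rcases hf with hf | hf <;> subst hf <;>
                (rw [goB.eq_def, lexA_esc (by decide) rest3, map_bind_out]
                 simp only [pA_some_some]
                 rw [bind_map_out, hQ3]
                 simp [pB.eq_def])
            · rw [not_or] at hf
              rw [goB.eq_def, lexA_esc_bad hf.1 hf.2]
              simp [pB.eq_def, hf.1, hf.2]
        · by_cases hd : c = '-'
          · subst hd
            match rest with
            | [] => rw [goB.eq_def, lexA_dash]; simp [lexA, pA_dash_nil]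
            | f :: rest3 =>
              have h3 : rest3.length ≤ n := by simp at hlen; omega
              by_cases hf : f = '\\'
              · subst hf
                match rest3 with
                | [] => rw [goB.eq_def, lexA_dash, lexA_esc_nil]; simp
                | g :: rest4 =>
                  have h4 : rest4.length ≤ n := by simp at h3; omega
                  by_cases hg : g = '\\' ∨ g = '-'
                  · have hP4 := (ih rest4 h4).1
                    rcases hg with hg | hg <;> subst hg <;>
                      (rw [goB.eq_def, lexA_dash, lexA_esc (by decide) rest4,
                           map_bind_out, map_bind_out]
                       simp only [pA_dash_some]
                       rw [bind_map_out, hP4]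
                       simp)
                  · rw [not_or] at hg
                    rw [goB.eq_def, lexA_dash, lexA_esc_bad hg.1 hg.2]
                    simp [hg.1, hg.2]
              · by_cases hf2 : f = '-'
                · subst hf2
                  rw [goB.eq_def, lexA_dash, lexA_dash, map_bind_out, map_bind_out]
                  simp only [pA_dash_dash]
                  rw [bind_none_out]
                  simp
                · have hP3 := (ih rest3 h3).1
                  rw [goB.eq_def, lexA_dash, lexA_lit hf hf2, map_bind_out, map_bind_out]
                  simp only [pA_dash_some]
                  rw [bind_map_out, hP3]
                  simp [hf, hf2]
          · have hQr := (ih rest hlen).2 c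
            rw [goB.eq_def, lexA_lit hc hd, map_bind_out]
            simp only [pA_some_some]
            rw [bind_map_out, hQr]
            simp [pB.eq_def, hc, hd]
      refine ⟨?_, hQ⟩
      -- P part
      by_cases hc : c = '\\'
      · subst hc
        match rest with
        | [] => rw [pB.eq_def, lexA_esc_nil]; simp
        | d :: rest' =>
          have h' : rest'.length ≤ n := by simp at hlen; omega
          by_cases hd : d = '\\' ∨ d = '-'
          · have hQ' := (ih rest' h').2 d
            rcases hd with hd | hd <;> subst hd <;>
              (rw [pB.eq_def, lexA_esc (by decide) rest', map_bind_out, hQ']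
               simp)
          · rw [not_or] at hd
            rw [pB.eq_def, lexA_esc_bad hd.1 hd.2]
            simp [hd.1, hd.2]
      · by_cases hd : c = '-'
        · subst hd
          rw [pB.eq_def, lexA_dash, map_bind_out]
          simp only [pA_none]
          rw [bind_none_out]
          simp
        · have hQr := (ih rest hlen).2 c
          rw [pB.eq_def, lexA_lit hc hd, map_bind_out, hQr]
          simp [hc, hd]

-- ===== VERDICT (by name: the statement is the Claim_ definition above) =====
theorem parse_glob_spec : Claim_equal_parse_glob := by
  intro glob _ _
  unfold Spec_parse_glob parse_glob parse_glob_alt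
  rw [(main_equiv glob.toList.length glob.toList le_rfl).1]
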